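-- pv_equiv track=rewrite | github.com/eliana-411/Analizador_de_Complejidad | Backend/core/analizador/agents/nodes/analyze_recursion_node.py | extract_if_block
-- ===== SOURCE A (Python) =====
-- from typing import List, Dict, Optional
--
-- def extract_if_block(lines: List[str], if_start: int) -> tuple[List[str], int]:
--     """
--     Extrae las líneas del bloque IF.
--
--     Args:
--         lines: Todas las líneas
--         if_start: Índice de la línea IF
--
--     Returns:
--         Tupla (líneas del bloque, índice de fin del bloque)
--     """
--     block_lines = []
--     i = if_start + 1
--     depth = 0
--
--     # Verificar si hay "begin" después del IF
--     has_begin = False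
--     if i < len(lines) and lines[i].strip().lower() == "begin":
--         has_begin = True
--         i += 1
--         depth = 1
--
--     # Leer hasta encontrar el fin del bloque
--     while i < len(lines):
--         line = lines[i].strip().lower()
--
--         if has_begin:
--             # Modo estructurado con begin/end
--             if line == "begin":
--                 depth += 1
--             elif line == "end":
--                 depth -= 1
--                 if depth == 0:
--                     return block_lines, i
--
--             block_lines.append(lines[i])
--         else:
--             # Modo sin begin: solo una línea después del IF
--             block_lines.append(lines[i])
--             return block_lines, i
--
--         i += 1
--
--     return block_lines, if_start + 1
-- ===== SOURCE B (Python) =====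
-- def extract_if_block(lines, if_start):
--     n = len(lines)
--     i = if_start + 1
--     if i >= n:
--         return [], if_start + 1
--     if lines[i].strip().lower() != "begin":
--         return [lines[i]], i
--     # begin mode: one pass that only tracks depth to find the matching 'end',
--     # then slice the block out in one go
--     depth = 1
--     for j in range(i + 1, n):
--         s = lines[j].strip().lower()
--         if s == "begin":
--             depth += 1
--         elif s == "end":
--             depth -= 1
--             if depth == 0:
--                 return lines[i + 1:j], j
--     return lines[i + 1:], if_start + 1
-- ===== Notes on version B (the rewrite author's own statement) =====
-- stated objective: simpler
-- what changed: B first decides the three terminal cases with early returns, tracking only the depth counter in a single scan to locate the matching 'end', and then produces the block by slicing lines[i+1:j] (or lines[i+1:]) instead of maintaining an accumulated block_lines list inside the loop.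
-- outside the precondition, e.g. on extract_if_block(['begin', 'x'], -3): A returns (['x', 'begin', 'x'], -2), B returns (['x'], -2)
import Mathlib
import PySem

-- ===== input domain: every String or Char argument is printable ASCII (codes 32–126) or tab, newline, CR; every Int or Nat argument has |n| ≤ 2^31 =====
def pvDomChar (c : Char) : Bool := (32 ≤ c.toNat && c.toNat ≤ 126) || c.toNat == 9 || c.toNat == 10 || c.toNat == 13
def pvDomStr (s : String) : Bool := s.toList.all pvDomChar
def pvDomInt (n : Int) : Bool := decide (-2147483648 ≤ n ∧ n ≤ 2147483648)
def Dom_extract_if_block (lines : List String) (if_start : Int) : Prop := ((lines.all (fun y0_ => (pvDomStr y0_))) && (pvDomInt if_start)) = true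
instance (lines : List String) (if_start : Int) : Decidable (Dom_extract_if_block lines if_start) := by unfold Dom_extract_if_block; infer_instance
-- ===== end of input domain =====

-- B replaces A's accumulate-as-you-scan loop by a depth-only scan that locates the matching
-- 'end' and a slice that extracts the block; return value equivalence is proved on if_start ≥ -1.

-- ===== PORT A =====
-- the while loop of A: state (block_lines, depth, i); hasBegin fixed before the loop;
-- fuel makes the recursion structural, fuel = (len - i).toNat at every call so fuel 0 ↔ loop exit
def extract_if_block_loop (lines : List String) (hasBegin : Bool) (block : List String)
    (depth : Int) (i : Int) (if_start : Int) : Nat → List String × Int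
  | 0 => (block, if_start + 1)
  | fuel + 1 =>
    if i < (lines.length : Int) then
      let cur := (PySem.List.pyGet? lines i).getD ""
      let line := PySem.Str.lower (PySem.Str.strip cur)
      if hasBegin then
        if line = "begin" then
          extract_if_block_loop lines hasBegin (block ++ [cur]) (depth + 1) (i + 1) if_start fuel
        else if line = "end" then
          if depth - 1 = 0 then (block, i)
          else extract_if_block_loop lines hasBegin (block ++ [cur]) (depth - 1) (i + 1) if_start fuel
        else
          extract_if_block_loop lines hasBegin (block ++ [cur]) depth (i + 1) if_start fuel
      else (block ++ [cur], i)
    else (block, if_start + 1)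

def extract_if_block (lines : List String) (if_start : Int) : List String × Int :=
  let i := if_start + 1
  if i < (lines.length : Int) ∧
      PySem.Str.lower (PySem.Str.strip ((PySem.List.pyGet? lines i).getD "")) = "begin" then
    extract_if_block_loop lines true [] 1 (i + 1) if_start ((lines.length : Int) - (i + 1)).toNat
  else
    extract_if_block_loop lines false [] 0 i if_start ((lines.length : Int) - i).toNat

-- ===== PORT B =====
-- the depth-only scan of Source B: index of the matching 'end', none if unterminated (same fuel scheme)
def find_end (lines : List String) (depth : Int) (j : Int) : Nat → Option Int
  | 0 => none
  | fuel + 1 =>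
    if j < (lines.length : Int) then
      let s := PySem.Str.lower (PySem.Str.strip ((PySem.List.pyGet? lines j).getD ""))
      if s = "begin" then find_end lines (depth + 1) (j + 1) fuel
      else if s = "end" then
        if depth - 1 = 0 then some j else find_end lines (depth - 1) (j + 1) fuel
      else find_end lines depth (j + 1) fuel
    else none

def extract_if_block_alt (lines : List String) (if_start : Int) : List String × Int :=
  let n := (lines.length : Int)
  let i := if_start + 1
  if i ≥ n then ([], if_start + 1)
  else
    let first := (PySem.List.pyGet? lines i).getD ""
    if PySem.Str.lower (PySem.Str.strip first) ≠ "begin" then ([first], i)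
    else
      match find_end lines 1 (i + 1) (n - (i + 1)).toNat with
      | some j => (PySem.List.slice lines (some (i + 1)) (some j), j)
      | none => (PySem.List.slice lines (some (i + 1)) none, if_start + 1)

-- ===== PRECONDITION & SPEC =====
-- Pre_ excludes if_start+1 < -len(lines), where A raises IndexError, and the accidental
-- negative-index wraparound case where lines[if_start+1] is a 'begin' with if_start ≤ -2: there
-- A collects wrapped lines one by one while B slices, and the two can differ; for every other
-- negative if_start both wrap to the same single-line answer, so those stay inside Pre_.
def Pre_extract_if_block (lines : List String) (if_start : Int) : Prop :=
  -(lines.length : Int) ≤ if_start + 1 ∧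
    (-1 ≤ if_start ∨
      PySem.Str.lower (PySem.Str.strip ((PySem.List.pyGet? lines (if_start + 1)).getD "")) ≠ "begin")
instance (lines : List String) (if_start : Int) : Decidable (Pre_extract_if_block lines if_start) := by unfold Pre_extract_if_block; infer_instance
def pvWitness_extract_if_block : List String × Int := (["if x", "begin", "y", "end"], 0)

def Spec_extract_if_block (lines : List String) (if_start : Int) (out : List String × Int) : Prop := out = extract_if_block_alt lines if_start
instance (lines : List String) (if_start : Int) (out : List String × Int) : Decidable (Spec_extract_if_block lines if_start out) := by unfold Spec_extract_if_block; infer_instance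

-- ===== CLAIM (what is proved, stated in full; the proofs are below) =====
def Claim_equal_extract_if_block : Prop := ∀ (lines : List String) (if_start : Int), Dom_extract_if_block lines if_start → Pre_extract_if_block lines if_start → Spec_extract_if_block lines if_start (extract_if_block lines if_start)

-- ===== LEMMAS AND PROOFS =====

-- find_end never answers an index before where it started
lemma find_end_ge (lines : List String) (k : Nat) :
    ∀ (depth j r : Int), find_end lines depth j k = some r → j ≤ r := by
  induction k with
  | zero => intro depth j r h; simp [find_end] at h
  | succ k ih =>
    intro depth j r h
    rw [find_end] at h
    by_cases hj : j < (lines.length : Int)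
    · rw [if_pos hj] at h
      simp only at h
      split_ifs at h with h1 h2 h3
      · have := ih (depth + 1) (j + 1) r h; omega
      · simp at h; omega
      · have := ih (depth - 1) (j + 1) r h; omega
      · have := ih depth (j + 1) r h; omega
    · rw [if_neg hj] at h
      exact absurd h (by simp)

-- unfolding one element off the front of a bounded slice
lemma slice_cons (lines : List String) (i j : Int) (hi : 0 ≤ i)
    (hlt : i < (lines.length : Int)) (hij : i < j) :
    PySem.List.slice lines (some i) (some j) =
      (PySem.List.pyGet? lines i).getD "" :: PySem.List.slice lines (some (i + 1)) (some j) := by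
  have h0j : 0 ≤ j := by omega
  rw [PySem.List.slice_toNat lines hi h0j, PySem.List.slice_toNat lines (by omega) h0j]
  have hlen : i.toNat < lines.length := by omega
  rw [PySem.List.pyGet?_eq_some_getElem lines hi hlt]
  simp only [Option.getD_some]
  rw [List.drop_eq_getElem_cons hlen]
  have h1 : (i + 1).toNat = i.toNat + 1 := by omega
  have h2 : j.toNat - i.toNat = (j.toNat - (i + 1).toNat) + 1 := by omega
  rw [h1, h2, List.take_succ_cons, h1]

-- unfolding one element off the front of an unbounded slice
lemma slice_none_cons (lines : List String) (i : Int) (hi : 0 ≤ i)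
    (hlt : i < (lines.length : Int)) :
    PySem.List.slice lines (some i) none =
      (PySem.List.pyGet? lines i).getD "" :: PySem.List.slice lines (some (i + 1)) none := by
  rw [PySem.List.slice_from lines hi, PySem.List.slice_from lines (by omega)]
  have hlen : i.toNat < lines.length := by omega
  rw [PySem.List.pyGet?_eq_some_getElem lines hi hlt]
  simp only [Option.getD_some]
  rw [List.drop_eq_getElem_cons hlen]
  have h1 : (i + 1).toNat = i.toNat + 1 := by omega
  rw [h1]

-- the empty slice
lemma slice_self (lines : List String) (i : Int) (hi : 0 ≤ i) :
    PySem.List.slice lines (some i) (some i) = [] := by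
  rw [PySem.List.slice_toNat lines hi hi]
  simp

-- an out-of-range unbounded slice is empty
lemma slice_none_nil (lines : List String) (i : Int) (hi : 0 ≤ i)
    (h : (lines.length : Int) ≤ i) :
    PySem.List.slice lines (some i) none = [] := by
  rw [PySem.List.slice_from lines hi]
  exact List.drop_eq_nil_of_le (by omega)

-- A's begin-mode loop computes B's find_end-plus-slice
lemma loop_begin (lines : List String) (k : Nat) :
    ∀ (block : List String) (depth i if_start : Int), 0 ≤ i →
      ((lines.length : Int) - i).toNat = k →
      extract_if_block_loop lines true block depth i if_start k =
        match find_end lines depth i k with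
        | some j => (block ++ PySem.List.slice lines (some i) (some j), j)
        | none => (block ++ PySem.List.slice lines (some i) none, if_start + 1) := by
  induction k with
  | zero =>
    intro block depth i if_start hi hk
    have hge : (lines.length : Int) ≤ i := by omega
    rw [extract_if_block_loop, find_end]
    simp [slice_none_nil lines i hi hge]
  | succ k ih =>
    intro block depth i if_start hi hk
    have hlt : i < (lines.length : Int) := by omega
    rw [extract_if_block_loop, find_end]
    rw [if_pos hlt, if_pos hlt]
    simp only [if_true]
    split_ifs with h1 h2 h3
    · -- "begin"
      rw [ih (block ++ [(PySem.List.pyGet? lines i).getD ""]) (depth + 1) (i + 1) if_start (by omega) (by omega)]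
      cases hfe : find_end lines (depth + 1) (i + 1) k with
      | some r =>
        have hr : i + 1 ≤ r := find_end_ge lines k (depth + 1) (i + 1) r hfe
        simp [slice_cons lines i r hi hlt (by omega)]
      | none => simp [slice_none_cons lines i hi hlt]
    · -- "end", depth becomes 0
      simp [slice_self lines i hi]
    · -- "end", depth stays positive
      rw [ih (block ++ [(PySem.List.pyGet? lines i).getD ""]) (depth - 1) (i + 1) if_start (by omega) (by omega)]
      cases hfe : find_end lines (depth - 1) (i + 1) k with
      | some r =>
        have hr : i + 1 ≤ r := find_end_ge lines k (depth - 1) (i + 1) r hfe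
        simp [slice_cons lines i r hi hlt (by omega)]
      | none => simp [slice_none_cons lines i hi hlt]
    · -- ordinary line
      rw [ih (block ++ [(PySem.List.pyGet? lines i).getD ""]) depth (i + 1) if_start (by omega) (by omega)]
      cases hfe : find_end lines depth (i + 1) k with
      | some r =>
        have hr : i + 1 ≤ r := find_end_ge lines k depth (i + 1) r hfe
        simp [slice_cons lines i r hi hlt (by omega)]
      | none => simp [slice_none_cons lines i hi hlt]

-- ===== VERDICT (by name: the statement is the Claim_ definition above) =====
theorem extract_if_block_spec : Claim_equal_extract_if_block := by
  intro lines if_start _hdom hpre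
  unfold Pre_extract_if_block at hpre
  obtain ⟨hlen, hpre2⟩ := hpre
  unfold Spec_extract_if_block
  simp only [extract_if_block, extract_if_block_alt]
  split_ifs with hAB hge hnb hge2 hnb2
  · exact absurd hAB.1 (by omega)
  · exact absurd hAB.2 hnb
  · -- begin mode: loop = find_end + slice
    have hi : -1 ≤ if_start := hpre2.resolve_right (fun h => h hAB.2)
    rw [loop_begin lines (((lines.length : Int) - (if_start + 1 + 1)).toNat)
          [] 1 (if_start + 1 + 1) if_start (by omega) rfl]
    cases hfe : find_end lines 1 (if_start + 1 + 1) (((lines.length : Int) - (if_start + 1 + 1)).toNat) <;> simp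
  · -- past the end of the file
    have hk : ((lines.length : Int) - (if_start + 1)).toNat = 0 := by omega
    rw [hk, extract_if_block_loop]
  · -- single-line block, no begin
    have hlt : if_start + 1 < (lines.length : Int) := by omega
    have hk : ((lines.length : Int) - (if_start + 1)).toNat =
        ((lines.length : Int) - (if_start + 1) - 1).toNat + 1 := by omega
    rw [hk, extract_if_block_loop, if_pos hlt]
    simp
  · exact absurd ⟨by omega, not_not.mp hnb2⟩ hAB
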